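-- pv_equiv track=rewrite | github.com/pypi-data/pypi-mirror-23 | packages/immagine/immagine-0.7.tar.gz/immagine-0.7/src/new_thumbnailer.py | sparse_iterator
-- ===== SOURCE A (Python) =====
-- def sparse_iterator(items, num_steps):
--     '''Sparse iteration over `items`. Every element of the list `items` is
--     returned exactly once, but with a different order which can be tweaked by
--     changing `num_steps`. The i-th invocation of the iterator roughly returns
--     items[i*len(items)//num_steps].
--     '''
--     assert num_steps >= 1
--     items = list(items)
--     idx = 0
--     while items:
--         if idx >= len(items):
--             idx = idx % len(items)
--         yield items[idx]
--         items.pop(idx)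
--         idx += len(items) // num_steps
-- ===== SOURCE B (Python) =====
-- def sparse_iterator(items, num_steps):
--     '''Sparse iteration over `items`, reimplemented in two phases: first the
--     positions within the shrinking list are computed by pure arithmetic,
--     then each position is mapped back to an index into the original list,
--     without ever mutating a list.'''
--     assert num_steps >= 1
--     items = list(items)
--     n = len(items)
--     positions = []
--     idx = 0
--     for m in range(n, 0, -1):
--         j = idx % m
--         positions.append(j)
--         idx = j + (m - 1) // num_steps
--     for t, j in enumerate(positions):
--         o = j
--         for p in reversed(positions[:t]):
--             if o >= p:
--                 o += 1
--         yield items[o]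
-- ===== Notes on version B (the rewrite author's own statement) =====
-- stated objective: alternative
-- what changed: B splits the work into two phases: it first computes the whole sequence of positions in the shrinking list by pure index arithmetic, then maps each position back to an index into the original (never mutated) list by undoing the earlier deletions, instead of A's single loop that pops from a mutable copy while iterating.
import Mathlib
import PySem

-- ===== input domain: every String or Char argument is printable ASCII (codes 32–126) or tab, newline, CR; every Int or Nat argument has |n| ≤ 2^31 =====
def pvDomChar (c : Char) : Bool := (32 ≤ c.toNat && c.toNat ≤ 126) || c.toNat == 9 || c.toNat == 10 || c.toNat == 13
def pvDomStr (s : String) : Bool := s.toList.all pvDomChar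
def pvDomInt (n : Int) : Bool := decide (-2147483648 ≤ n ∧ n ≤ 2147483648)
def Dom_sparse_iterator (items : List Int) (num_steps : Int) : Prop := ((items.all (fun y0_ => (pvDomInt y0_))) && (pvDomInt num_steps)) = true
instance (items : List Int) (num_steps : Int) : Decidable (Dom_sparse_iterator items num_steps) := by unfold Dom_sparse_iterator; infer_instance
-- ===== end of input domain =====

-- B replaces A's destructive loop (pop from a mutable copy while iterating) by two phases:
-- pure index arithmetic producing the positions in the shrinking list, then a back-mapping of
-- each position through the earlier deletions to an index into the original, unmutated list.
-- Equivalence of the RETURN value (the list of yielded elements) is proved for num_steps >= 1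
-- (A's assert raises otherwise).

-- ===== PORT A =====
-- A's while-loop, totalized by fuel = length of the remaining list (each iteration pops one element)
def pvLoopA (num_steps : Int) : Nat → List Int → Int → List Int
  | 0, _, _ => []
  | _ + 1, [], _ => []
  | fuel + 1, x :: xs, idx =>
    let idx2 := if idx ≥ ((x :: xs).length : Int) then PySem.Int.mod idx ((x :: xs).length : Int) else idx
    match PySem.List.pop? (x :: xs) idx2 with
    | none => []   -- IndexError: unreachable here (idx2 is a nonnegative remainder)
    | some (y, rest) => y :: pvLoopA num_steps fuel rest (idx2 + PySem.Int.floordiv (rest.length : Int) num_steps)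

def sparse_iterator (items : List Int) (num_steps : Int) : List Int :=
  -- 'assert num_steps >= 1' raises for num_steps < 1: excluded by Pre_
  if 1 ≤ num_steps then pvLoopA num_steps items.length items 0 else []

-- ===== PORT B =====
-- phase 1 body: j = idx % m; positions.append(j); idx = j + (m - 1) // num_steps
def pvPhase1Step (num_steps : Int) (st : List Int × Int) (m : Int) : List Int × Int :=
  let j := PySem.Int.mod st.2 m
  (st.1 ++ [j], j + PySem.Int.floordiv (m - 1) num_steps)

-- phase 2 body: if o >= p: o += 1
def pvBackStep (o p : Int) : Int := if o ≥ p then o + 1 else o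

def sparse_iterator_alt (items : List Int) (num_steps : Int) : List Int :=
  if 1 ≤ num_steps then
    let positions := ((PySem.List.pyRange (items.length : Int) 0 (-1)).foldl (pvPhase1Step num_steps) ([], 0)).1
    (PySem.List.enumerate positions 0).map (fun tj =>
      let o := ((PySem.List.slice positions none (some tj.1)).reverse).foldl pvBackStep tj.2
      PySem.List.pyGetD items o 0)
  else []

-- ===== PRECONDITION & SPEC =====
-- Pre_ excludes exactly num_steps < 1, on which A's 'assert num_steps >= 1' raises AssertionError.
def Pre_sparse_iterator (items : List Int) (num_steps : Int) : Prop := 1 ≤ num_steps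
instance (items : List Int) (num_steps : Int) : Decidable (Pre_sparse_iterator items num_steps) := by unfold Pre_sparse_iterator; infer_instance
def pvWitness_sparse_iterator : List Int × Int := ([5, -3, 7, 7, 0], 2)

def Spec_sparse_iterator (items : List Int) (num_steps : Int) (out : List Int) : Prop := out = sparse_iterator_alt items num_steps
instance (items : List Int) (num_steps : Int) (out : List Int) : Decidable (Spec_sparse_iterator items num_steps out) := by unfold Spec_sparse_iterator; infer_instance

-- ===== CLAIM (what is proved, stated in full; the proofs are below) =====
def Claim_equal_sparse_iterator : Prop := ∀ (items : List Int) (num_steps : Int), Dom_sparse_iterator items num_steps → Pre_sparse_iterator items num_steps → Spec_sparse_iterator items num_steps (sparse_iterator items num_steps)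

-- ===== LEMMAS AND PROOFS =====

-- Nat-level model shared by both sides
def pvPosSeq (k : Nat) : Nat → Nat → List Nat
  | 0, _ => []
  | m + 1, idx => idx % (m + 1) :: pvPosSeq k m (idx % (m + 1) + m / k)

def pvBackStepN (o p : Nat) : Nat := if p ≤ o then o + 1 else o

def pvBackN (ps : List Nat) (j : Nat) : Nat := ps.reverse.foldl pvBackStepN j

def pvEraseF (items : List Int) (ps : List Nat) : List Int :=
  ps.foldl (fun l p => l.eraseIdx p) items

def pvOutB (items : List Int) : List Nat → List Nat → List Int
  | _, [] => []
  | ps, j :: rest => items.getD (pvBackN ps j) 0 :: pvOutB items (ps ++ [j]) rest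

-- back-mapping through the deletions is exact, position by position
theorem pv_get_eraseF (items : List Int) (ps : List Nat) (j : Nat) :
    (pvEraseF items ps)[j]? = items[pvBackN ps j]? := by
  induction ps using List.reverseRecOn generalizing j with
  | nil => simp [pvEraseF, pvBackN]
  | append_singleton ps p ih =>
    have h1 : pvEraseF items (ps ++ [p]) = (pvEraseF items ps).eraseIdx p := by
      simp [pvEraseF]
    have h2 : pvBackN (ps ++ [p]) j = pvBackN ps (pvBackStepN j p) := by
      simp [pvBackN]
    rw [h1, h2, List.getElem?_eraseIdx, ← ih]
    unfold pvBackStepN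
    split_ifs with h h' h' <;> (try rfl) <;> omega

-- one-step unfolding of A's loop on a nonempty list
theorem pvLoopA_cons (k : Int) (fuel : Nat) (x : Int) (xs : List Int) (idx : Int) :
    pvLoopA k (fuel + 1) (x :: xs) idx =
      (match PySem.List.pop? (x :: xs)
          (if idx ≥ ((x :: xs).length : Int) then PySem.Int.mod idx ((x :: xs).length : Int) else idx) with
      | none => []
      | some (y, rest) => y :: pvLoopA k fuel rest
          ((if idx ≥ ((x :: xs).length : Int) then PySem.Int.mod idx ((x :: xs).length : Int) else idx)
            + PySem.Int.floordiv (rest.length : Int) k)) := rfl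

-- main induction: A's loop on the current list = B's back-mapped output
theorem pv_main (items : List Int) (k : Nat) :
    ∀ (m : Nat) (ps : List Nat) (idx : Nat), (pvEraseF items ps).length = m →
      pvLoopA (k : Int) m (pvEraseF items ps) (idx : Int) = pvOutB items ps (pvPosSeq k m idx) := by
  intro m
  induction m with
  | zero =>
    intro ps idx hlen
    rw [List.length_eq_zero_iff.mp hlen]
    rfl
  | succ m ih =>
    intro ps idx hlen
    obtain ⟨x, xs, hcons⟩ : ∃ x xs, pvEraseF items ps = x :: xs := by
      cases h : pvEraseF items ps with
      | nil => rw [h] at hlen; simp at hlen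
      | cons a as => exact ⟨a, as, rfl⟩
    rw [hcons] at hlen ⊢
    have hjlt : idx % (m + 1) < m + 1 := Nat.mod_lt _ (Nat.succ_pos m)
    have hjl : idx % (m + 1) < (x :: xs).length := hlen ▸ hjlt
    have hidx2 : (if (idx : Int) ≥ ((x :: xs).length : Int) then
        PySem.Int.mod (idx : Int) ((x :: xs).length : Int) else (idx : Int))
        = ((idx % (m + 1) : Nat) : Int) := by
      rw [hlen]
      split_ifs with h
      · exact PySem.Int.mod_natCast idx (m + 1)
      · have hlt : idx < m + 1 := by omega
        rw [Nat.mod_eq_of_lt hlt]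
    have hpop := PySem.List.pop?_natCast (x :: xs) (idx % (m + 1)) hjl
    rw [pvLoopA_cons, hidx2, hpop]
    dsimp only
    have hrestlen : ((x :: xs).eraseIdx (idx % (m + 1))).length = m := by
      rw [List.length_eraseIdx_of_lt hjl, hlen]
      omega
    rw [hrestlen, PySem.Int.floordiv_natCast m k]
    rw [show ((idx % (m + 1) : Nat) : Int) + ((m / k : Nat) : Int)
        = (((idx % (m + 1) + m / k : Nat)) : Int) by push_cast; ring]
    have hrest : (x :: xs).eraseIdx (idx % (m + 1)) = pvEraseF items (ps ++ [idx % (m + 1)]) := by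
      rw [← hcons]; simp [pvEraseF]
    rw [hrest, ih _ _ (by rw [← hrest]; exact hrestlen)]
    rw [show pvPosSeq k (m + 1) idx
        = idx % (m + 1) :: pvPosSeq k m (idx % (m + 1) + m / k) from rfl]
    rw [show pvOutB items ps (idx % (m + 1) :: pvPosSeq k m (idx % (m + 1) + m / k))
        = items.getD (pvBackN ps (idx % (m + 1))) 0
          :: pvOutB items (ps ++ [idx % (m + 1)]) (pvPosSeq k m (idx % (m + 1) + m / k)) from rfl]
    congr 1
    have hget := pv_get_eraseF items ps (idx % (m + 1))
    rw [hcons, List.getElem?_eq_getElem hjl] at hget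
    rw [List.getD_eq_getElem?_getD, ← hget]
    simp

-- phase 1 of B computes (the Int casts of) pvPosSeq
theorem pv_phase1 (k : Nat) :
    ∀ (n : Nat) (acc : List Int) (idx : Nat),
      ((PySem.List.pyRange (n : Int) 0 (-1)).foldl (pvPhase1Step (k : Int)) (acc, (idx : Int))).1
        = acc ++ (pvPosSeq k n idx).map (fun x : Nat => (x : Int)) := by
  intro n
  induction n with
  | zero =>
    intro acc idx
    rw [PySem.List.pyRange_neg_one_eq_nil (by norm_num)]
    simp [pvPosSeq]
  | succ n ih =>
    intro acc idx
    rw [PySem.List.pyRange_neg_one_cons (by exact_mod_cast Nat.succ_pos n), List.foldl_cons]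
    rw [show (((n + 1 : Nat) : Int)) - 1 = ((n : Nat) : Int) by push_cast; ring]
    have hstep : pvPhase1Step (k : Int) (acc, (idx : Int)) (((n + 1 : Nat) : Int))
        = (acc ++ [((idx % (n + 1) : Nat) : Int)], ((idx % (n + 1) + n / k : Nat) : Int)) := by
      unfold pvPhase1Step
      rw [PySem.Int.mod_natCast idx (n + 1)]
      rw [show (((n + 1 : Nat) : Int)) - 1 = ((n : Nat) : Int) by push_cast; ring]
      rw [PySem.Int.floordiv_natCast n k]
      dsimp only
      rw [show ((idx % (n + 1) : Nat) : Int) + ((n / k : Nat) : Int)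
          = ((idx % (n + 1) + n / k : Nat) : Int) by push_cast; ring]
    rw [hstep, ih]
    rw [show pvPosSeq k (n + 1) idx = idx % (n + 1) :: pvPosSeq k n (idx % (n + 1) + n / k) from rfl]
    simp

-- the Int fold of phase 2 is the cast of the Nat fold
theorem pv_castFold : ∀ (l : List Nat) (j : Nat),
    (l.map (fun x : Nat => (x : Int))).foldl pvBackStep (j : Int) = ((l.foldl pvBackStepN j : Nat) : Int) := by
  intro l
  induction l with
  | nil => intro j; rfl
  | cons p l ih =>
    intro j
    simp only [List.map_cons, List.foldl_cons]
    have : pvBackStep (j : Int) ((p : Nat) : Int) = ((pvBackStepN j p : Nat) : Int) := by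
      unfold pvBackStep pvBackStepN
      split_ifs with h h' h' <;> omega
    rw [this, ih]

-- phase 2 of B, over the suffix of positions starting at preN.length, is pvOutB
theorem pv_phase2 (items : List Int) : ∀ (restN preN : List Nat),
    (PySem.List.enumerate (restN.map (fun x : Nat => (x : Int))) ((preN.length : Nat) : Int)).map
      (fun tj =>
        PySem.List.pyGetD items
          (((PySem.List.slice ((preN ++ restN).map (fun x : Nat => (x : Int))) none (some tj.1)).reverse).foldl pvBackStep tj.2) 0)
    = pvOutB items preN restN := by
  intro restN
  induction restN with
  | nil => intro preN; simp [pvOutB]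
  | cons j rest ih =>
    intro preN
    rw [List.map_cons, PySem.List.enumerate_cons, List.map_cons]
    have hslice : PySem.List.slice ((preN ++ j :: rest).map (fun x : Nat => (x : Int))) none
        (some ((preN.length : Nat) : Int)) = preN.map (fun x : Nat => (x : Int)) := by
      rw [PySem.List.slice_to_natCast]
      rw [List.map_append]
      rw [List.take_left' (by simp)]
    have hhead : PySem.List.pyGetD items
        (((PySem.List.slice ((preN ++ j :: rest).map (fun x : Nat => (x : Int))) none
            (some ((preN.length : Nat) : Int))).reverse).foldl pvBackStep ((j : Nat) : Int)) 0
        = items.getD (pvBackN preN j) 0 := by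
      rw [hslice, ← List.map_reverse, pv_castFold]
      rw [show (preN.reverse.foldl pvBackStepN j) = pvBackN preN j from rfl]
      exact PySem.List.pyGetD_natCast items (pvBackN preN j) 0
    have htail : (PySem.List.enumerate (rest.map (fun x : Nat => (x : Int))) (((preN.length : Nat) : Int) + 1)).map
        (fun tj =>
          PySem.List.pyGetD items
            (((PySem.List.slice ((preN ++ j :: rest).map (fun x : Nat => (x : Int))) none (some tj.1)).reverse).foldl pvBackStep tj.2) 0)
        = pvOutB items (preN ++ [j]) rest := by
      have hlen : (((preN.length : Nat) : Int) + 1) = (((preN ++ [j]).length : Nat) : Int) := by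
        simp
      have happ : preN ++ j :: rest = (preN ++ [j]) ++ rest := by simp
      rw [hlen, happ]
      exact ih (preN ++ [j])
    rw [hhead, htail]
    rfl

-- ===== VERDICT (by name: the statement is the Claim_ definition above) =====
theorem sparse_iterator_spec : Claim_equal_sparse_iterator := by
  intro items num_steps _ hpre
  unfold Spec_sparse_iterator sparse_iterator sparse_iterator_alt
  have hpre' : 1 ≤ num_steps := hpre
  rw [if_pos hpre', if_pos hpre']
  set k : Nat := num_steps.toNat with hkdef
  have hkk : (k : Int) = num_steps := Int.toNat_of_nonneg (by omega)
  have hk1 : 1 ≤ k := by omega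
  have hA : pvLoopA num_steps items.length items 0
      = pvOutB items [] (pvPosSeq k items.length 0) := by
    have := pv_main items k items.length [] 0 (by simp [pvEraseF])
    rw [hkk] at this
    simpa [pvEraseF] using this
  have hpos : ((PySem.List.pyRange (items.length : Int) 0 (-1)).foldl (pvPhase1Step num_steps) ([], 0)).1
      = (pvPosSeq k items.length 0).map (fun x : Nat => (x : Int)) := by
    have := pv_phase1 k items.length [] 0
    rw [hkk] at this
    simpa using this
  have hB := pv_phase2 items (pvPosSeq k items.length 0) []
  simp only [List.nil_append, List.length_nil, Nat.cast_zero] at hB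
  rw [hA, hpos, hB]
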